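-- pv_equiv track=rewrite | github.com/Cbrower/Triangulation | cones/genBirkhoff.py | genString
-- ===== SOURCE A (Python) =====
-- from itertools import permutations
--
-- def genString(N):
--     perm = permutations([i for i in range(N)])
--
--     buf = ""
--     for p in perm:
--         row = [0 for i in range(N*N)]
--         row.append(1)
--         for i in range(len(p)):
--             row[i*N + p[i]] = 1
--         buf += " ".join(str(e) for e in row) + "\n"
--
--     return buf
-- ===== SOURCE B (Python) =====
-- def genString(N):
--     # Iterative breadth-wise construction: starting from ([], [0..N-1]), expand
--     # every partial assignment by choosing the next entry from its remaining
--     # values in ascending order (itertools' emission order), one level per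
--     # step.  Each finished permutation's matrix row is then emitted directly
--     # as string cells ('0'*v + '1' + '0'*(N-1-v) per entry, padded to the full
--     # N*N width) instead of allocating and mutating an integer row.
--     base = [i for i in range(N)]
--     part = [([], base)]
--     for _ in range(len(base)):
--         part = [(pre + [v], rem[:j] + rem[j + 1:])
--                 for (pre, rem) in part
--                 for j, v in enumerate(rem)]
--     lines = []
--     for (pre, _) in part:
--         cells = []
--         for v in pre:
--             cells.extend(["0"] * v + ["1"] + ["0"] * (N - 1 - v))
--         for _ in range(N * N - len(cells)):
--             cells.append("0")
--         cells.append("1")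
--         lines.append(" ".join(cells))
--     return "\n".join(lines) + "\n"
-- ===== Notes on version B (the rewrite author's own statement) =====
-- stated objective: alternative
-- what changed: Replaces itertools.permutations plus per-permutation allocate-and-mutate of an integer row by an iterative level-by-level expansion of partial assignments (choosing the next entry from the remaining values in ascending order) that emits each matrix line directly as string segments ('0'*v + '1' + '0'*(N-1-v) per entry, padded to the fixed N*N row width), with lines joined once at the end instead of accumulating buf +=.
import Mathlib
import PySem

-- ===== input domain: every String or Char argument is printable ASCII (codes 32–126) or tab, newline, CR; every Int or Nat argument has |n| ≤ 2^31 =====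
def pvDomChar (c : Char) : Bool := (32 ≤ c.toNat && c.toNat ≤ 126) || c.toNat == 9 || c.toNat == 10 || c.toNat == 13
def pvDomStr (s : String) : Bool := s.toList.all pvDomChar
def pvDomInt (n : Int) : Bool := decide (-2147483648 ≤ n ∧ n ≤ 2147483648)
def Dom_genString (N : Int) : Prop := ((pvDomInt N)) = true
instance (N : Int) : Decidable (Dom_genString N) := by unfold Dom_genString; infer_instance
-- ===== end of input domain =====

-- B differs: permutations are built by iterative level-by-level expansion of partial
-- assignments and each line is assembled directly from string segments instead of
-- mutating an integer row.

-- ===== PORT A =====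
-- row = [0]*(N*N) + [1]; for i in range(len(p)): row[i*N + p[i]] = 1
def rowA (N : Int) (p : List Int) : List Int :=
  (PySem.List.pyRange 0 (p.length : Int) 1).foldl
    (fun r i => PySem.List.pySetD r (i * N + PySem.List.pyGetD p i 0) 1)
    ((PySem.List.pyRange 0 (N * N) 1).map (fun _ => 0) ++ [1])

def genString (N : Int) : String :=
  let lst := PySem.List.pyRange 0 N 1
  let perm := PySem.List.permutations lst lst.length
  perm.foldl (fun buf p =>
    buf ++ PySem.Str.join " " ((rowA N p).map PySem.Int.toStr) ++ "\n") ""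

-- ===== PORT B =====
-- cells: for v in prefix: cells += ["0"]*v + ["1"] + ["0"]*(N-1-v)
def segCells (N : Int) (pref : List Int) : List String :=
  pref.foldl (fun cells v =>
    cells ++ (PySem.List.pyRepeat ["0"] v ++ ["1"] ++ PySem.List.pyRepeat ["0"] (N - 1 - v))) []

-- for _ in range(N*N - len(cells)): cells.append("0");  cells.append("1"); " ".join(cells)
def lineOf (N : Int) (pref : List Int) : String :=
  PySem.Str.join " "
    (((PySem.List.pyRange 0 (N * N - ((segCells N pref).length : Int)) 1).foldl
        (fun c _ => c ++ ["0"]) (segCells N pref))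
     ++ ["1"])

-- one expansion level: part = [(pre+[v], rem[:j]+rem[j+1:]) for (pre, rem) in part for j, v in enumerate(rem)]
def expandOnce (part : List (List Int × List Int)) : List (List Int × List Int) :=
  part.flatMap (fun pr =>
    (PySem.List.enumerate pr.2 0).map (fun jv =>
      (pr.1 ++ [jv.2],
       PySem.List.slice pr.2 none (some jv.1) ++ PySem.List.slice pr.2 (some (jv.1 + 1)) none)))

def genString_alt (N : Int) : String :=
  let base := PySem.List.pyRange 0 N 1
  let part := (PySem.List.pyRange 0 (base.length : Int) 1).foldl
      (fun part _ => expandOnce part) [([], base)]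
  PySem.Str.join "\n" (part.map (fun pr => lineOf N pr.1)) ++ "\n"

-- ===== PRECONDITION & SPEC =====
def Spec_genString (N : Int) (out : String) : Prop := out = genString_alt N
instance (N : Int) (out : String) : Decidable (Spec_genString N out) := by unfold Spec_genString; infer_instance

-- ===== CLAIM (what is proved, stated in full; the proofs are below) =====
def Claim_equal_genString : Prop := ∀ (N : Int), Dom_genString N → Spec_genString N (genString N)

-- ===== LEMMAS AND PROOFS =====

-- (x :: xs).set i 1 viewed on a block of zeros
theorem set_replicate_zero (n i : Nat) (h : i < n) :
    (List.replicate n (0 : Int)).set i 1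
      = List.replicate i 0 ++ 1 :: List.replicate (n - 1 - i) (0 : Int) := by
  have hsplit : List.replicate n (0 : Int)
      = List.replicate i 0 ++ List.replicate (1 + (n - 1 - i)) 0 := by
    rw [List.replicate_append_replicate]; congr 1; omega
  rw [hsplit, List.set_append_right i 1 (by simp)]
  simp
  rw [show (1 + (n - 1 - i)) = (n - 1 - i) + 1 from by omega]
  simp [List.replicate_succ]

-- enumerate-based flatMap as a range-based flatMap
theorem flatMap_enumerate {α β : Type} (xs : List α) (s : Int) (g : Int × α → List β) :
    (PySem.List.enumerate xs s).flatMap g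
      = (List.range xs.length).flatMap
          (fun (i : Nat) => (xs[i]?.map (fun v => g (s + Int.ofNat i, v))).getD []) := by
  induction xs generalizing s with
  | nil => simp [PySem.List.enumerate_nil]
  | cons x xs ih =>
    rw [PySem.List.enumerate_cons, List.flatMap_cons, ih (s + 1)]
    rw [List.length_cons, List.range_succ_eq_map, List.flatMap_cons, List.flatMap_map]
    have hhead : ((x :: xs)[0]?.map (fun v => g (s + Int.ofNat 0, v))).getD [] = g (s, x) := by
      simp
    rw [hhead]
    congr 1
    rw [List.flatMap_def, List.flatMap_def]
    congr 1
    apply List.map_congr_left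
    intro i _
    simp only [List.getElem?_cons_succ, Nat.succ_eq_add_one]
    rw [show s + Int.ofNat (i + 1) = s + 1 + Int.ofNat i from by simp only [Int.ofNat_eq_natCast]; push_cast; ring]

-- a loop whose body ignores the element is function iteration
theorem foldl_iterate {α β : Type} (h : α → α) :
    ∀ (l : List β) (init : α), l.foldl (fun s _ => h s) init = h^[l.length] init := by
  intro l
  induction l with
  | nil => intro init; simp
  | cons x xs ih =>
    intro init
    rw [List.foldl_cons, ih (h init), List.length_cons, Function.iterate_succ_apply]

-- m expansion levels turn every partial pair into its itertools permutations, in order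
theorem expand_iter : ∀ (m : Nat) (ps : List (List Int × List Int)),
    (∀ pr ∈ ps, (pr.2 : List Int).length = m) →
    expandOnce^[m] ps
      = ps.flatMap (fun pr =>
          (PySem.List.permutations pr.2 m).map (fun p => (pr.1 ++ p, ([] : List Int)))) := by
  intro m
  induction m with
  | zero =>
    intro ps h
    simp only [Function.iterate_zero, id_eq, PySem.List.permutations_zero]
    induction ps with
    | nil => simp
    | cons q qs ihq =>
      rw [List.flatMap_cons, ← ihq (fun pr hpr => h pr (List.mem_cons_of_mem _ hpr))]
      have h2 : q.2 = [] := List.length_eq_zero_iff.mp (h q List.mem_cons_self)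
      simp
      rw [← h2]
  | succ n ih =>
    intro ps h
    rw [Function.iterate_succ_apply, ih (expandOnce ps) (by
      intro pr hpr
      unfold expandOnce at hpr
      rw [List.mem_flatMap] at hpr
      obtain ⟨q, hq, hpr⟩ := hpr
      rw [List.mem_map] at hpr
      obtain ⟨jv, hjv, rfl⟩ := hpr
      rw [PySem.List.mem_enumerate_iff] at hjv
      obtain ⟨k, hk, rfl⟩ := hjv
      have hql := h q hq
      simp only [zero_add]
      rw [PySem.List.slice_to_natCast, show ((k : Int) + 1) = ((k + 1 : Nat) : Int) from by push_cast; ring,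
          PySem.List.slice_from_natCast, ← List.eraseIdx_eq_take_drop_succ]
      rw [List.length_eraseIdx]
      split <;> omega)]
    unfold expandOnce
    rw [List.flatMap_assoc]
    rw [List.flatMap_def, List.flatMap_def]
    congr 1
    apply List.map_congr_left
    intro pr _
    rw [List.flatMap_map, flatMap_enumerate, PySem.List.permutations_succ, List.map_flatMap]
    rw [List.flatMap_def, List.flatMap_def]
    congr 1
    apply List.map_congr_left
    intro i hi
    rw [List.mem_range] at hi
    have hget : pr.2[i]? = some (pr.2[i]'hi) := by
      simp [List.getElem?_eq_getElem hi]
    rw [hget]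
    simp only [Option.map_some, Option.getD_some]
    have hslice1 : PySem.List.slice pr.2 none (some ((0 : Int) + Int.ofNat i))
        = pr.2.take i := by
      rw [show (0 : Int) + Int.ofNat i = ((i : Nat) : Int) from by
            simp only [Int.ofNat_eq_natCast]; ring]
      rw [PySem.List.slice_to_natCast]
    have hslice2 : PySem.List.slice pr.2 (some ((0 : Int) + Int.ofNat i + 1)) none
        = pr.2.drop (i + 1) := by
      rw [show (0 : Int) + Int.ofNat i + 1 = ((i + 1 : Nat) : Int) from by
            simp only [Int.ofNat_eq_natCast]; push_cast; ring]
      rw [PySem.List.slice_from_natCast]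
    rw [hslice1, hslice2, ← List.eraseIdx_eq_take_drop_succ, List.map_map]
    apply List.map_congr_left
    intro p _
    simp

theorem permutations_ne_nil : ∀ (fuel : Nat) (xs : List Int), xs.length = fuel →
    PySem.List.permutations xs fuel ≠ [] := by
  intro fuel
  induction fuel with
  | zero => intro xs h; simp [PySem.List.permutations_zero]
  | succ n ih =>
    intro xs h
    cases xs with
    | nil => simp at h
    | cons x xs =>
      rw [PySem.List.permutations_succ]
      intro hc
      rw [List.flatMap_eq_nil_iff] at hc
      have h0 := hc 0 (by simp)
      simp only [List.getElem?_cons_zero] at h0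
      rw [List.map_eq_nil_iff] at h0
      exact ih xs (by simpa using h) (by simpa using h0)

-- A's index loop over range(len(p)) is the fold over enumerate(p)
theorem foldl_range_getD {β : Type} :
    ∀ (p : List Int) (s : Nat) (f : β → Int → Int → β) (init : β),
    (PySem.List.pyRange (s : Int) ((s : Int) + (p.length : Int)) 1).foldl
        (fun r i => f r i (PySem.List.pyGetD p (i - (s : Int)) 0)) init
      = (PySem.List.enumerate p (s : Int)).foldl (fun r jv => f r jv.1 jv.2) init := by
  intro p
  induction p with
  | nil =>
    intro s f init
    rw [PySem.List.pyRange_one_eq_nil (by simp)]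
    simp [PySem.List.enumerate_nil]
  | cons x p ih =>
    intro s f init
    have hlt : (s : Int) < (s : Int) + ((x :: p).length : Int) := by
      simp only [List.length_cons]; push_cast; omega
    rw [PySem.List.pyRange_one_cons hlt, List.foldl_cons]
    have hhead : PySem.List.pyGetD (x :: p) ((s : Int) - (s : Int)) 0 = x := by
      rw [show (s : Int) - (s : Int) = ((0 : Nat) : Int) from by omega]
      rw [PySem.List.pyGetD_natCast]
      rfl
    rw [hhead]
    have hb : (s : Int) + ((x :: p).length : Int) = ((s + 1 : Nat) : Int) + (p.length : Int) := by
      simp only [List.length_cons]; push_cast; ring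
    rw [hb]
    have hs1 : (s : Int) + 1 = ((s + 1 : Nat) : Int) := by push_cast; ring
    rw [hs1]
    rw [PySem.List.foldl_congr_mem _ _
        (fun r i => f r i (PySem.List.pyGetD p (i - ((s + 1 : Nat) : Int)) 0)) _
        (by
          intro acc i hi
          rw [PySem.List.mem_pyRange_one] at hi
          obtain ⟨hi1, hi2⟩ := hi
          congr 1
          have hm : i - (s : Int) = (((i - ((s + 1 : Nat) : Int)).toNat + 1 : Nat) : Int) := by
            push_cast at hi1 ⊢
            omega
          rw [hm, PySem.List.pyGetD_natCast]
          rw [show i - ((s + 1 : Nat) : Int) = (((i - ((s + 1 : Nat) : Int)).toNat : Nat) : Int) from by push_cast at hi1 ⊢; omega]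
          rw [PySem.List.pyGetD_natCast]
          simp only [Int.toNat_natCast, List.getD_cons_succ])]
    rw [ih (s + 1) f]
    rw [PySem.List.enumerate_cons, List.foldl_cons, hs1]

-- the set-fold writes one '1'-block per entry
theorem setfold_eq (N : Int) :
    ∀ (q : List Int) (s : Nat) (pre tail : List Int),
    (∀ v ∈ q, 0 ≤ v ∧ v < N) → pre.length = s * N.toNat →
    (PySem.List.enumerate q (s : Int)).foldl
        (fun r jv => PySem.List.pySetD r (jv.1 * N + jv.2) 1)
        (pre ++ List.replicate (q.length * N.toNat) 0 ++ tail)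
      = pre ++ q.flatMap
          (fun v => List.replicate v.toNat 0 ++ 1 :: List.replicate (N - 1 - v).toNat (0 : Int))
          ++ tail := by
  intro q
  induction q with
  | nil => intro s pre tail _ _; simp [PySem.List.enumerate_nil]
  | cons v q ih =>
    intro s pre tail hb hpre
    obtain ⟨hv0, hvN⟩ := hb v (by simp)
    have hN1 : (1 : Int) ≤ N := by omega
    have hNn : N = (N.toNat : Int) := by omega
    have hvn : v.toNat < N.toNat := by omega
    rw [PySem.List.enumerate_cons, List.foldl_cons]
    have hv' : v = (v.toNat : Int) := by omega
    have hidx : (s : Int) * N + v = ((s * N.toNat + v.toNat : Nat) : Int) := by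
      conv_lhs => rw [hNn, hv']
      push_cast; ring
    have hsplit : List.replicate ((v :: q).length * N.toNat) (0 : Int)
        = List.replicate N.toNat 0 ++ List.replicate (q.length * N.toNat) 0 := by
      rw [List.replicate_append_replicate]; congr 1; simp [List.length_cons]; ring
    rw [hsplit]
    have hset : PySem.List.pySetD
        (pre ++ (List.replicate N.toNat 0 ++ List.replicate (q.length * N.toNat) 0) ++ tail)
        ((s : Int) * N + v) 1
        = (pre ++ (List.replicate v.toNat 0 ++ 1 :: List.replicate (N - 1 - v).toNat 0))
          ++ List.replicate (q.length * N.toNat) 0 ++ tail := by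
      rw [hidx, PySem.List.pySetD_natCast]
      rw [show pre ++ (List.replicate N.toNat (0:Int) ++ List.replicate (q.length * N.toNat) 0) ++ tail
            = pre ++ (List.replicate N.toNat 0 ++ (List.replicate (q.length * N.toNat) 0 ++ tail)) from by simp only [List.append_assoc]]
      rw [List.set_append_right _ _ (by simp [hpre])]
      rw [show s * N.toNat + v.toNat - pre.length = v.toNat from by omega]
      rw [List.set_append_left _ _ (by simp [hvn])]
      rw [set_replicate_zero N.toNat v.toNat hvn]
      have htn : (N - 1 - v).toNat = N.toNat - 1 - v.toNat := by omega
      rw [htn]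
      simp only [List.append_assoc, List.cons_append]
    rw [hset]
    have hseg : (List.replicate v.toNat (0 : Int) ++ 1 :: List.replicate (N - 1 - v).toNat 0).length
        = N.toNat := by
      simp; omega
    have hlen2 : (pre ++ (List.replicate v.toNat 0 ++ 1 :: List.replicate (N - 1 - v).toNat (0:Int))).length
        = (s + 1) * N.toNat := by
      rw [List.length_append, hpre, hseg]; ring
    have hb' : ∀ w ∈ q, 0 ≤ w ∧ w < N := fun w hw => hb w (by simp [hw])
    have := ih (s + 1)
        (pre ++ (List.replicate v.toNat 0 ++ 1 :: List.replicate (N - 1 - v).toNat 0))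
        tail hb' hlen2
    rw [show ((s : Int) + 1) = ((s + 1 : Nat) : Int) from by push_cast; ring]
    rw [this]
    simp

-- per-permutation line equality
theorem line_eq (N : Int) (hN : 0 ≤ N) (p : List Int)
    (hb : ∀ v ∈ p, 0 ≤ v ∧ v < N) (hl : p.length = N.toNat) :
    PySem.Str.join " " ((rowA N p).map PySem.Int.toStr) = lineOf N p := by
  have hrow : rowA N p
      = p.flatMap (fun v => List.replicate v.toNat 0 ++ 1 :: List.replicate (N - 1 - v).toNat (0 : Int))
        ++ [1] := by
    unfold rowA
    have hinit : (PySem.List.pyRange 0 (N * N) 1).map (fun _ => (0 : Int))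
        = List.replicate (p.length * N.toNat) 0 := by
      rw [PySem.List.pyRange_one, List.map_map]
      have hc : (N * N - 0).toNat = p.length * N.toNat := by
        have hNn : N = (N.toNat : Int) := by omega
        rw [Int.sub_zero, hl]
        conv_lhs => rw [hNn]
        rw [← Nat.cast_mul, Int.toNat_natCast]
      rw [hc]
      simp [Function.comp_def, List.map_const']
    rw [hinit]
    have h0 := foldl_range_getD (β := List Int) p 0
        (fun r i v => PySem.List.pySetD r (i * N + v) 1)
        (List.replicate (p.length * N.toNat) 0 ++ [1])
    simp only [Nat.cast_zero, zero_add, Int.sub_zero] at h0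
    refine h0.trans ?_
    have := setfold_eq N p 0 [] [1] hb (by simp)
    simpa using this
  have hcell : segCells N p
      = p.flatMap (fun v => List.replicate v.toNat "0" ++ "1" :: List.replicate (N - 1 - v).toNat "0") := by
    unfold segCells
    rw [PySem.List.foldl_append_eq_flatMap]
    simp only [List.nil_append]
    congr 1
    funext v
    simp [PySem.List.pyRepeat_singleton]
  have hseglen : ∀ v ∈ p,
      (List.replicate v.toNat "0" ++ "1" :: List.replicate (N - 1 - v).toNat "0").length = N.toNat := by
    intro v hv
    obtain ⟨h1, h2⟩ := hb v hv
    simp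
    omega
  have hlen : ((segCells N p).length : Int) = N * N := by
    rw [hcell, List.length_flatMap]
    rw [List.map_congr_left (fun v hv => hseglen v hv)]
    rw [List.map_const', List.sum_replicate, smul_eq_mul, hl]
    have hNn : N = (N.toNat : Int) := by omega
    conv_rhs => rw [hNn]
    push_cast
    ring
  rw [hrow]
  unfold lineOf
  rw [hlen, sub_self]
  rw [show PySem.List.pyRange (0 : Int) 0 1 = [] from PySem.List.pyRange_one_eq_nil (by omega)]
  rw [List.foldl_nil, hcell]
  congr 1
  rw [List.map_append, List.map_flatMap, show List.map PySem.Int.toStr [1] = ["1"] from rfl]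
  congr 1
  rw [List.flatMap_def, List.flatMap_def]
  congr 1
  apply List.map_congr_left
  intro v _
  simp [show PySem.Int.toStr 0 = "0" from rfl, show PySem.Int.toStr 1 = "1" from rfl]

-- the empty permutation's line: a full row of zeros (covers every N < 0 and N = 0)
theorem line_eq_nil (N : Int) :
    PySem.Str.join " " ((rowA N []).map PySem.Int.toStr) = lineOf N [] := by
  unfold rowA lineOf segCells
  simp only [List.length_nil, Nat.cast_zero, List.foldl_nil, Int.sub_zero]
  rw [show PySem.List.pyRange (0 : Int) 0 1 = [] from PySem.List.pyRange_one_eq_nil (by omega)]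
  rw [List.foldl_nil]
  rw [PySem.List.foldl_append_singleton_eq_map (f := fun (_ : Int) => "0")]
  congr 1
  simp [List.map_append, show PySem.Int.toStr 0 = "0" from rfl,
        show PySem.Int.toStr 1 = "1" from rfl]

-- accumulating "buf += line + '\n'" equals joining with '\n' and one final '\n'
theorem joinNl {α : Type} (g : α → String) :
    ∀ (l : List α), l ≠ [] → ∀ (acc : String),
    l.foldl (fun b x => b ++ g x ++ "\n") acc
      = acc ++ PySem.Str.join "\n" (l.map g) ++ "\n" := by
  intro l
  induction l with
  | nil => intro h; exact absurd rfl h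
  | cons x l ih =>
    intro _ acc
    cases l with
    | nil =>
      have hj : PySem.Str.join "\n" [g x] = g x := by
        apply String.toList_inj.mp
        rw [PySem.Str.toList_join]
        simp [PySem.Chars.join_singleton]
      simp [List.foldl, hj]
    | cons y l =>
      rw [List.foldl_cons, ih (by simp) (acc ++ g x ++ "\n")]
      have hj : PySem.Str.join "\n" (g x :: g y :: l.map g)
          = g x ++ "\n" ++ PySem.Str.join "\n" (g y :: l.map g) := by
        apply String.toList_inj.mp
        simp [PySem.Str.toList_join, PySem.Chars.join_cons_cons]
      simp only [List.map_cons]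
      rw [hj]
      simp [String.append_assoc]

-- ===== VERDICT (by name: the statement is the Claim_ definition above) =====
theorem genString_spec : Claim_equal_genString := by
  unfold Claim_equal_genString
  intro N _
  unfold Spec_genString genString genString_alt
  by_cases hN : 0 ≤ N
  case neg =>
    have hneg : N < 0 := by omega
    rw [show PySem.List.pyRange (0 : Int) N 1 = [] from PySem.List.pyRange_one_eq_nil (by omega)]
    simp only [List.length_nil, Nat.cast_zero]
    rw [show PySem.List.pyRange (0 : Int) 0 1 = [] from PySem.List.pyRange_one_eq_nil (by omega)]
    rw [PySem.List.permutations_zero]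
    simp only [List.foldl_nil, List.foldl_cons, List.map_cons, List.map_nil]
    rw [line_eq_nil]
    have hj : PySem.Str.join "\n" [lineOf N []] = lineOf N [] := by
      apply String.toList_inj.mp
      rw [PySem.Str.toList_join]
      simp [PySem.Chars.join_singleton]
    rw [hj]
    apply String.toList_inj.mp
    simp [String.toList_append]
  case pos =>
    obtain ⟨n0, rfl⟩ := Int.eq_ofNat_of_zero_le hN
    simp only []
    rw [foldl_iterate expandOnce]
    rw [show (PySem.List.pyRange (0 : Int) ((PySem.List.pyRange (0 : Int) (n0 : Int) 1).length : Int) 1).length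
          = (PySem.List.pyRange (0 : Int) (n0 : Int) 1).length from by
        rw [PySem.List.length_pyRange_one]; simp]
    rw [expand_iter _ [([], PySem.List.pyRange 0 (n0 : Int) 1)]
          (by intro pr hpr; rw [List.mem_singleton] at hpr; subst hpr; rfl)]
    simp only [List.flatMap_cons, List.flatMap_nil, List.append_nil, List.map_map,
               Function.comp_def]
    have hne : (PySem.List.permutations (PySem.List.pyRange 0 (n0 : Int) 1)
        (PySem.List.pyRange 0 (n0 : Int) 1).length) ≠ [] :=
      permutations_ne_nil _ _ rfl
    rw [PySem.List.foldl_congr_mem _ _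
        (fun buf p => buf ++ lineOf (n0 : Int) ([] ++ p) ++ "\n") _
        (by
          intro buf p hp
          have hperm := PySem.List.perm_of_mem_permutations hp
          have hlp : p.length = ((n0 : Int)).toNat := by
            rw [hperm.length_eq, PySem.List.length_pyRange_one]
            simp
          have hbv : ∀ v ∈ p, 0 ≤ v ∧ v < (n0 : Int) := by
            intro v hv
            have hvl : v ∈ PySem.List.pyRange 0 (n0 : Int) 1 := hperm.subset hv
            rw [PySem.List.mem_pyRange_one] at hvl
            exact hvl
          rw [line_eq (n0 : Int) (by positivity) p hbv hlp]
          simp)]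
    rw [joinNl (fun p => lineOf (n0 : Int) ([] ++ p)) _ hne ""]
    apply String.toList_inj.mp
    simp [String.toList_append]
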